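-- pv_equiv track=rewrite | github.com/andrewsacher/pyDownloader1 | Parser/Parser.py | isblank
-- ===== SOURCE A (Python) =====
-- def isblank(A):
--     if type(A) is str:
--         AA = A
--         for c in 'Nn/Aa ':
--             AA = AA.replace(c,'')
--         if (len(AA)>0) and (any(c.isalpha() for c in AA)):
--             return False
--         elif (len(AA)>0) and (any(c.isdigit() for c in AA)):
--             return False
--         else:
--             return True
--     else:
--         return False
-- ===== SOURCE B (Python) =====
-- def isblank(A):
--     if type(A) is not str:
--         return False
--     for c in A:
--         if (c.isalpha() or c.isdigit()) and c not in 'NnAa':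
--             return False
--     return True
-- ===== Notes on version B (the rewrite author's own statement) =====
-- stated objective: simpler
-- what changed: Replaced the six replace passes plus two any-scans over the filtered copy by a single early-exit scan over the original string that returns False at the first alphanumeric character other than the four ignored letters.
import Mathlib
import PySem

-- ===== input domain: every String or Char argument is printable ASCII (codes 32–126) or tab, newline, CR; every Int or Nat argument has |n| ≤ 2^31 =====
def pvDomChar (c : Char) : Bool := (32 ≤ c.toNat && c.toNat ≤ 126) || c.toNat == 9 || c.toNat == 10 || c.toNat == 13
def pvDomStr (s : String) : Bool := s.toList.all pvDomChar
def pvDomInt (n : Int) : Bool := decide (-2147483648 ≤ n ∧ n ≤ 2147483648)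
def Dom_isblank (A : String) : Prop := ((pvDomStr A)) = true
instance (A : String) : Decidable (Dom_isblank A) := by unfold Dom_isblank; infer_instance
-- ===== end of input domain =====

-- B replaces A's six replace passes plus two any-scans over the filtered copy with one early-exit scan over the original string; objective: simpler.

-- ===== PORT A =====
-- AA = A; for c in 'Nn/Aa ': AA = AA.replace(c, '')  (ported on the List Char side, per the PySem convention)
def isblank (A : String) : Bool :=
  let AA := ['N','n','/','A','a',' '].foldl (fun AA c => PySem.Chars.replace AA [c] []) A.toList
  if decide (0 < AA.length) && AA.any (fun c => PySem.Chars.isalpha c) then false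
  else if decide (0 < AA.length) && AA.any (fun c => PySem.Chars.isdigit c) then false
  else true

-- ===== PORT B =====
-- for c in A: if (c.isalpha() or c.isdigit()) and c not in 'NnAa': return False ; return True
def blankLoop : List Char → Bool
  | [] => true
  | c :: rest =>
    if (PySem.Chars.isalpha c || PySem.Chars.isdigit c) && !(['N','n','A','a'].contains c) then false
    else blankLoop rest

def isblank_alt (A : String) : Bool := blankLoop A.toList

-- ===== PRECONDITION & SPEC =====
def Spec_isblank (A : String) (out : Bool) : Prop := out = isblank_alt A
instance (A : String) (out : Bool) : Decidable (Spec_isblank A out) := by unfold Spec_isblank; infer_instance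

-- ===== CLAIM (what is proved, stated in full; the proofs are below) =====
def Claim_equal_isblank : Prop := ∀ (A : String), Dom_isblank A → Spec_isblank A (isblank A)

-- ===== LEMMAS AND PROOFS =====

-- str.replace with a one-char pattern and empty replacement is a filter
lemma go_singleton_empty (c : Char) : ∀ (fuel : Nat) (l acc : List Char), l.length ≤ fuel →
    PySem.Chars.replace.go [c] [] fuel l acc = acc.reverse ++ l.filter (· ≠ c) := by
  intro fuel
  induction fuel with
  | zero =>
    intro l acc h
    cases l with
    | nil => simp [PySem.Chars.replace.go]
    | cons x t => simp at h
  | succ n ih =>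
    intro l acc h
    cases l with
    | nil => simp [PySem.Chars.replace.go]
    | cons x t =>
      have ht : t.length ≤ n := by simp at h; omega
      simp only [PySem.Chars.replace.go]
      by_cases hx : c = x
      · subst hx
        simp [ih _ _ ht, List.filter]
      · have hxc : x ≠ c := fun h' => hx h'.symm
        simp [hx, hxc, ih _ _ ht, List.filter]

lemma replace_singleton_empty (c : Char) (l : List Char) :
    PySem.Chars.replace l [c] [] = l.filter (· ≠ c) := by
  rw [PySem.Chars.replace]
  simp only [List.isEmpty_cons, if_false, Bool.false_eq_true]
  simpa using go_singleton_empty c l.length l [] (le_refl _)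

-- B's early-exit loop computes "no offending character in the list"
lemma blankLoop_eq_any (l : List Char) :
    blankLoop l = !l.any (fun c =>
      (PySem.Chars.isalpha c || PySem.Chars.isdigit c) && !(['N','n','A','a'].contains c)) := by
  induction l with
  | nil => rfl
  | cons x t ih =>
    simp only [blankLoop, List.any_cons, Bool.not_or, ih]
    by_cases hp : ((PySem.Chars.isalpha x || PySem.Chars.isdigit x) && !(['N','n','A','a'].contains x)) = true
    · rw [if_pos hp, hp]; simp
    · rw [if_neg hp]
      rw [Bool.not_eq_true] at hp
      rw [hp]; simp

-- the leading length guard is redundant: any non-empty witness forces length > 0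
lemma len_guard (l : List Char) (p : Char → Bool) :
    (decide (0 < l.length) && l.any p) = l.any p := by
  cases l <;> simp

lemma any_or_distrib (l : List Char) (p q : Char → Bool) :
    l.any (fun x => p x || q x) = (l.any p || l.any q) := by
  induction l with
  | nil => rfl
  | cons x t ih =>
    simp only [List.any_cons, ih]
    cases p x <;> cases q x <;> simp

-- ===== VERDICT (by name: the statement is the Claim_ definition above) =====
lemma ite2 (a b : Bool) : (if a = true then false else if b = true then false else true) = !(a || b) := by
  cases a <;> cases b <;> simp

set_option maxRecDepth 8000 in
theorem isblank_spec : Claim_equal_isblank := by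
  intro A _
  unfold Spec_isblank isblank isblank_alt
  simp only [List.foldl, replace_singleton_empty, List.filter_filter]
  simp only [len_guard]
  simp only [List.any_filter, blankLoop_eq_any, ite2]
  rw [← any_or_distrib]
  congr 1
  apply PySem.List.any_congr_mem
  intro x _
  by_cases e1 : x = 'N'
  · subst e1; decide
  by_cases e2 : x = 'n'
  · subst e2; decide
  by_cases e3 : x = '/'
  · subst e3; decide
  by_cases e4 : x = 'A'
  · subst e4; decide
  by_cases e5 : x = 'a'
  · subst e5; decide
  by_cases e6 : x = ' '
  · subst e6; decide
  simp [e1, e2, e3, e4, e5, e6]
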